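-- pv_equiv track=rewrite | github.com/TreborOscorima/Sistema-de-Ventas | app/states/cash/payment_utils_mixin.py | _sorted_payment_keys
-- ===== SOURCE A (Python) =====
-- def _sorted_payment_keys(keys: list[str]) -> list[str]:
--     """Ordena claves de métodos de pago en orden estándar.
--
--     Args:
--         keys: Lista de claves de métodos
--
--     Returns:
--         Lista ordenada según prioridad visual estándar
--     """
--     order = [
--         "cash",
--         "debit",
--         "credit",
--         "yape",
--         "plin",
--         "transfer",
--         "mixed",
--         "other",
--     ]
--     ordered = [key for key in order if key in keys]
--     for key in keys:
--         if key not in ordered: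
--             ordered.append(key)
--     return ordered
-- ===== SOURCE B (Python) =====
-- def _sorted_payment_keys(keys: list[str]) -> list[str]:
--     """Bucket-sort re-implementation: dedup once, then drop each key into its
--     priority bucket (extras in the last bucket) and concatenate the buckets."""
--     order = [
--         "cash",
--         "debit",
--         "credit",
--         "yape",
--         "plin",
--         "transfer",
--         "mixed",
--         "other",
--     ]
--     priority = {k: i for i, k in enumerate(order)}
--     deduped = list(dict.fromkeys(keys))
--     buckets = [[] for _ in range(len(order) + 1)]
--     for k in deduped:
--         buckets[priority.get(k, len(order))].append(k)
--     return [k for bucket in buckets for k in bucket]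
-- ===== Notes on version B (the rewrite author's own statement) =====
-- stated objective: faster
-- what changed: Replaces A's filter-over-order plus append-loop with a linear membership scan per element by a one-pass bucket sort: deduplicate the keys once, drop each key into its priority bucket via a precomputed index dict, and concatenate the buckets.
import Mathlib
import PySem

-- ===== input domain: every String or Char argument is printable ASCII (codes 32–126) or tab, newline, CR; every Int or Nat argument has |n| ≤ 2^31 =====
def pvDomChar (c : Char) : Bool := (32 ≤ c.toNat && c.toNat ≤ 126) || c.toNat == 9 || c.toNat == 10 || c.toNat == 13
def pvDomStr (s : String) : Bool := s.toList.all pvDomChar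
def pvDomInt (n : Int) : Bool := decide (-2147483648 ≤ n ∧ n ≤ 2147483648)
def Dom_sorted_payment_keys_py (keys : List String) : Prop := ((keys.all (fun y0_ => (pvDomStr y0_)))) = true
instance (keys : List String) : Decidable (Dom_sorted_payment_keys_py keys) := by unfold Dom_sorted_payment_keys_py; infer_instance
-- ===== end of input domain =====

set_option maxRecDepth 4000


-- B replaces A's filter-over-order plus append-with-membership-scan by a one-pass bucket
-- sort over the deduplicated keys (priority-index dict, one bucket per standard key plus an
-- extras bucket); equivalence of the two is proved on all inputs (A is total).

-- ===== PORT A =====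
def sorted_payment_keys_py (keys : List String) : List String :=
  let order : List String :=
    ["cash", "debit", "credit", "yape", "plin", "transfer", "mixed", "other"]
  let ordered := order.filter (fun key => keys.contains key)
  keys.foldl (fun ordered key => if ordered.contains key then ordered else ordered ++ [key]) ordered

-- ===== PORT B =====
def pvOrder : List String :=
  ["cash", "debit", "credit", "yape", "plin", "transfer", "mixed", "other"]

-- priority = {k: i for i, k in enumerate(order)}
def pvPriority : PySem.Dict String Int :=
  (PySem.List.enumerate pvOrder).foldl (fun d p => d.insert p.2 p.1) PySem.Dict.empty

-- buckets[priority.get(k, len(order))].append(k)   (the index is always in 0..8, so in range)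
def pvBucketStep (buckets : List (List String)) (k : String) : List (List String) :=
  let i := pvPriority.getD k (pvOrder.length : Int)
  PySem.List.pySetD buckets i (PySem.List.pyGetD buckets i [] ++ [k])

def sorted_payment_keys_py_alt (keys : List String) : List String :=
  let deduped := PySem.List.dedup keys          -- list(dict.fromkeys(keys))
  let buckets := deduped.foldl pvBucketStep (List.replicate (pvOrder.length + 1) [])
  buckets.flatten                               -- [k for bucket in buckets for k in bucket]

-- ===== PRECONDITION & SPEC =====
def Spec_sorted_payment_keys_py (keys : List String) (out : List String) : Prop := out = sorted_payment_keys_py_alt keys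
instance (keys : List String) (out : List String) : Decidable (Spec_sorted_payment_keys_py keys out) := by unfold Spec_sorted_payment_keys_py; infer_instance

-- ===== CLAIM (what is proved, stated in full; the proofs are below) =====
def Claim_equal_sorted_payment_keys_py : Prop := ∀ (keys : List String), Dom_sorted_payment_keys_py keys → Spec_sorted_payment_keys_py keys (sorted_payment_keys_py keys)

-- ===== LEMMAS AND PROOFS =====

-- the priority function, written out as a plain nested conditional
def prN (k : String) : Nat :=
  if k = "cash" then 0 else if k = "debit" then 1 else if k = "credit" then 2 else
  if k = "yape" then 3 else if k = "plin" then 4 else if k = "transfer" then 5 else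
  if k = "mixed" then 6 else if k = "other" then 7 else 8

theorem pvPriority_eq : pvPriority = PySem.Dict.mk
    [("cash",0),("debit",1),("credit",2),("yape",3),("plin",4),("transfer",5),("mixed",6),("other",7)] := by
  decide

theorem getD_pvPriority (k : String) : pvPriority.getD k (pvOrder.length : Int) = (prN k : Int) := by
  show pvPriority.getD k 8 = (prN k : Int)
  rw [pvPriority_eq]
  unfold prN
  split_ifs with h1 h2 h3 h4 h5 h6 h7 h8
  · subst h1; decide
  · subst h2; decide
  · subst h3; decide
  · subst h4; decide
  · subst h5; decide
  · subst h6; decide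
  · subst h7; decide
  · subst h8; decide
  · simp only [PySem.Dict.getD, PySem.Dict.get?_mk_cons, beq_iff_eq]
    rw [if_neg (Ne.symm h1), if_neg (Ne.symm h2), if_neg (Ne.symm h3), if_neg (Ne.symm h4),
        if_neg (Ne.symm h5), if_neg (Ne.symm h6), if_neg (Ne.symm h7), if_neg (Ne.symm h8)]
    rfl

theorem prN_lt (k : String) : prN k < 9 := by
  unfold prN; split_ifs <;> omega

theorem pvBucketStep_eq (bs : List (List String)) (k : String) :
    pvBucketStep bs k = bs.set (prN k) (bs.getD (prN k) [] ++ [k]) := by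
  simp [pvBucketStep, getD_pvPriority, PySem.List.pySetD_natCast, PySem.List.pyGetD_natCast]

theorem bucket_foldl (D : List String) : ∀ (bs : List (List String)), bs.length = 9 →
    ∀ (i : Nat), (D.foldl pvBucketStep bs)[i]? =
      bs[i]?.map (· ++ D.filter (fun k => prN k == i)) := by
  induction D with
  | nil => intro bs _ i; simp
  | cons k D ih =>
    intro bs hlen i
    have hk := prN_lt k
    rw [List.foldl_cons, pvBucketStep_eq,
        ih _ (by simp [hlen]), List.getElem?_set]
    by_cases hi : prN k = i
    · subst hi
      have hlt : prN k < bs.length := by omega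
      simp [hlt, List.getD_eq_getElem?_getD]
    · simp [hi]

theorem buckets_eq (keys : List String) :
    (PySem.List.dedup keys).foldl pvBucketStep (List.replicate 9 []) =
      [ (PySem.List.dedup keys).filter (fun k => prN k == 0),
        (PySem.List.dedup keys).filter (fun k => prN k == 1),
        (PySem.List.dedup keys).filter (fun k => prN k == 2),
        (PySem.List.dedup keys).filter (fun k => prN k == 3),
        (PySem.List.dedup keys).filter (fun k => prN k == 4),
        (PySem.List.dedup keys).filter (fun k => prN k == 5),
        (PySem.List.dedup keys).filter (fun k => prN k == 6),
        (PySem.List.dedup keys).filter (fun k => prN k == 7),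
        (PySem.List.dedup keys).filter (fun k => prN k == 8) ] := by
  apply List.ext_getElem?
  intro i
  rw [bucket_foldl _ _ (by simp) i]
  match i with
  | 0 | 1 | 2 | 3 | 4 | 5 | 6 | 7 | 8 => simp
  | n + 9 => simp

-- a filter for one fixed priority slot picks exactly the corresponding standard key, once
theorem filter_slot (keys : List String) (i : Nat) (a : String)
    (ha : ∀ x, (prN x = i) ↔ x = a) :
    (PySem.List.dedup keys).filter (fun k => prN k == i) =
      if a ∈ keys then [a] else [] := by
  have h1 : (PySem.List.dedup keys).filter (fun k => prN k == i)
      = (PySem.List.dedup keys).filter (fun k => k == a) := by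
    apply List.filter_congr
    intro x _
    simp [ha x]
  rw [h1, List.filter_beq]
  by_cases hm : a ∈ keys
  · have : a ∈ PySem.List.dedup keys := by simp [hm]
    rw [List.count_eq_one_of_mem (PySem.List.nodup_dedup keys) this]
    simp [hm]
  · have : a ∉ PySem.List.dedup keys := by simp [hm]
    rw [List.count_eq_zero_of_not_mem this]
    simp [hm]

theorem prN_eq_eight_iff (x : String) : prN x = 8 ↔ x ∉ pvOrder := by
  unfold prN pvOrder
  split_ifs with h1 h2 h3 h4 h5 h6 h7 h8 <;> simp_all

-- ===== VERDICT (by name: the statement is the Claim_ definition above) =====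

theorem filter_eq_flatten (p : String → Bool) : ∀ (l : List String),
    l.filter p = (l.map (fun a => if p a then [a] else [])).flatten := by
  intro l
  induction l with
  | nil => rfl
  | cons a l ih => by_cases h : p a <;> simp [h, ih]

theorem sorted_payment_keys_py_spec : Claim_equal_sorted_payment_keys_py := by
  intro keys _
  unfold Spec_sorted_payment_keys_py sorted_payment_keys_py sorted_payment_keys_py_alt
  show PySem.Set.update (pvOrder.filter (fun key => keys.contains key)) keys
      = ((PySem.List.dedup keys).foldl pvBucketStep (List.replicate 9 [])).flatten
  rw [PySem.Set.update_eq_append_filter, buckets_eq keys]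
  rw [filter_slot keys 0 "cash" (by intro x; unfold prN; split_ifs <;> simp_all),
      filter_slot keys 1 "debit" (by intro x; unfold prN; split_ifs <;> simp_all),
      filter_slot keys 2 "credit" (by intro x; unfold prN; split_ifs <;> simp_all),
      filter_slot keys 3 "yape" (by intro x; unfold prN; split_ifs <;> simp_all),
      filter_slot keys 4 "plin" (by intro x; unfold prN; split_ifs <;> simp_all),
      filter_slot keys 5 "transfer" (by intro x; unfold prN; split_ifs <;> simp_all),
      filter_slot keys 6 "mixed" (by intro x; unfold prN; split_ifs <;> simp_all),
      filter_slot keys 7 "other" (by intro x; unfold prN; split_ifs <;> simp_all)]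
  have htail : (PySem.List.dedup keys).filter (fun k => prN k == 8) =
      (PySem.Set.ofList keys).filter (fun y => !(PySem.Set.contains ((pvOrder.filter (fun key => keys.contains key)) : PySem.Set String) y)) := by
    rw [show PySem.List.dedup keys = PySem.Set.ofList keys from PySem.List.dedup_eq_ofList keys]
    apply List.filter_congr
    intro x hx
    have hxk : x ∈ keys := (PySem.Set.mem_ofList keys x).1 hx
    by_cases ho : x ∈ pvOrder
    · have h8 : ¬ prN x = 8 := by rw [prN_eq_eight_iff]; simp [ho]
      simp [h8, List.mem_filter, ho, hxk]
    · have h8 : prN x = 8 := (prN_eq_eight_iff x).2 ho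
      simp [h8, List.mem_filter, ho]
  rw [htail, filter_eq_flatten (fun key => keys.contains key) pvOrder]
  simp [pvOrder, List.flatten, List.append_assoc]
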